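-- pv_equiv track=rewrite | github.com/EijiToriki/atcorder | ABC_Answer/B/290_299/297.py | judge_B
-- ===== SOURCE A (Python) =====
-- def judge_B(S):
--     judge_set = set()
--     for i, s in enumerate(S):
--         if s == 'B':
--             judge_set.add(i%2)
--
--     if len(judge_set) == 2:
--         return True
--     else:
--         return False
-- ===== SOURCE B (Python) =====
-- def judge_B(S):
--     even = any(ch == 'B' for i, ch in enumerate(S) if i % 2 == 0)
--     odd = any(ch == 'B' for i, ch in enumerate(S) if i % 2 == 1)
--     return even and odd
-- ===== Notes on version B (the rewrite author's own statement) =====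
-- stated objective: alternative
-- what changed: Replaces the single pass that accumulates a set of index-parities (answering via the set's size) with two independent short-circuiting any() scans, one per parity, combined with a boolean conjunction.
import Mathlib
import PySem

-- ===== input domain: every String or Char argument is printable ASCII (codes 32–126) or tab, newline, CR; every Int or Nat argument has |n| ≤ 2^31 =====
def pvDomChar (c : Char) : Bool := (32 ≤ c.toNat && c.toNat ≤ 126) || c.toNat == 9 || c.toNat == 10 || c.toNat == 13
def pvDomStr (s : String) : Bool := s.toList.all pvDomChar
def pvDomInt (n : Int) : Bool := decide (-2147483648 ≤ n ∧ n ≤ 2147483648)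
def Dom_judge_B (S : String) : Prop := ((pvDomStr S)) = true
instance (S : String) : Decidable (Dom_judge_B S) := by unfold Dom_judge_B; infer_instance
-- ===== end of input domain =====

-- B replaces A's single pass accumulating a set of index-parities with two independent
-- per-parity any() scans combined by a conjunction (alternative decomposition, same cost).

-- ===== PORT A =====
-- loop building judge_set (a Python set) over enumerate(S), then len == 2 test
def judge_B (S : String) : Bool :=
  let judge_set : PySem.Set Int :=
    (PySem.List.enumerate S.toList 0).foldl
      (fun st p => if p.2 = 'B' then PySem.Set.add st (PySem.Int.mod p.1 2) else st)
      PySem.Set.empty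
  if PySem.Set.len judge_set = 2 then true else false

-- ===== PORT B =====
-- two any() generator scans over enumerate(S), one per parity, then `and`
def judge_B_alt (S : String) : Bool :=
  let even := (PySem.List.enumerate S.toList 0).any
      (fun p => PySem.Int.mod p.1 2 == 0 && p.2 == 'B')
  let odd := (PySem.List.enumerate S.toList 0).any
      (fun p => PySem.Int.mod p.1 2 == 1 && p.2 == 'B')
  even && odd

-- ===== PRECONDITION & SPEC =====
def Spec_judge_B (S : String) (out : Bool) : Prop := out = judge_B_alt S
instance (S : String) (out : Bool) : Decidable (Spec_judge_B S out) := by unfold Spec_judge_B; infer_instance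

-- ===== CLAIM (what is proved, stated in full; the proofs are below) =====
def Claim_equal_judge_B : Prop := ∀ (S : String), Dom_judge_B S → Spec_judge_B S (judge_B S)

-- ===== LEMMAS AND PROOFS =====

-- membership in A's fold result
theorem pv_mem_fold (l : List Char) (s : Int) (st : PySem.Set Int) (x : Int) :
    x ∈ (PySem.List.enumerate l s).foldl
      (fun st p => if p.2 = 'B' then PySem.Set.add st (PySem.Int.mod p.1 2) else st) st ↔
    x ∈ st ∨ ∃ p ∈ PySem.List.enumerate l s, p.2 = 'B' ∧ PySem.Int.mod p.1 2 = x := by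
  induction l generalizing s st with
  | nil => simp [PySem.List.enumerate_nil]
  | cons c l ih =>
    rw [PySem.List.enumerate_cons]
    simp only [List.foldl_cons, List.mem_cons, ih]
    by_cases hc : c = 'B' <;> (simp [hc, PySem.Set.mem_add]; try tauto)

theorem pv_nodup_fold (l : List (Int × Char)) (st : PySem.Set Int) (h : st.Nodup) :
    (l.foldl (fun st p => if p.2 = 'B' then PySem.Set.add st (PySem.Int.mod p.1 2) else st) st).Nodup := by
  induction l generalizing st with
  | nil => exact h
  | cons p l ih =>
    simp only [List.foldl_cons]
    split
    · exact ih _ (PySem.Set.nodup_add _ _ h)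
    · exact ih _ h

theorem pv_mod_two (x : Int) : PySem.Int.mod x 2 = 0 ∨ PySem.Int.mod x 2 = 1 := by
  have h1 : 0 ≤ PySem.Int.mod x 2 := PySem.Int.mod_nonneg x (by norm_num)
  have h2 : PySem.Int.mod x 2 < 2 := PySem.Int.mod_lt x (by norm_num)
  omega

-- a nodup list of elements of {0,1} has length 2 iff both 0 and 1 are members
theorem pv_len_two (st : List Int) (hn : st.Nodup) (hs : ∀ x ∈ st, x = 0 ∨ x = 1) :
    st.length = 2 ↔ (0 : Int) ∈ st ∧ (1 : Int) ∈ st := by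
  match st with
  | [] => simp
  | [a] =>
    rcases hs a (by simp) with h | h <;> subst h <;> simp
  | a :: b :: t =>
    rcases hs a (by simp) with ha | ha <;> rcases hs b (by simp) with hb | hb <;>
      subst ha <;> subst hb
    · simp at hn
    · match t with
      | [] => simp
      | c :: t' => rcases hs c (by simp) with hc | hc <;> subst hc <;> simp at hn
    · match t with
      | [] => simp
      | c :: t' => rcases hs c (by simp) with hc | hc <;> subst hc <;> simp at hn
    · simp at hn

theorem pv_any_eq (l : List (Int × Char)) (k : Int) :
    (l.any (fun p => PySem.Int.mod p.1 2 == k && p.2 == 'B')) = true ↔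
    ∃ p ∈ l, p.2 = 'B' ∧ PySem.Int.mod p.1 2 = k := by
  simp only [List.any_eq_true, Bool.and_eq_true, beq_iff_eq]
  constructor
  · rintro ⟨p, hp, h1, h2⟩; exact ⟨p, hp, h2, h1⟩
  · rintro ⟨p, hp, h1, h2⟩; exact ⟨p, hp, h2, h1⟩

-- ===== VERDICT (by name: the statement is the Claim_ definition above) =====
theorem judge_B_spec : Claim_equal_judge_B := by
  intro S _
  unfold Spec_judge_B judge_B judge_B_alt
  simp only []
  have hnodup := pv_nodup_fold (PySem.List.enumerate S.toList 0) PySem.Set.empty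
    (by simp [PySem.Set.empty])
  generalize hF : (PySem.List.enumerate S.toList 0).foldl
      (fun st p => if p.2 = 'B' then PySem.Set.add st (PySem.Int.mod p.1 2) else st)
      PySem.Set.empty = F at *
  have hmem : ∀ x : Int, x ∈ F ↔ ∃ p ∈ PySem.List.enumerate S.toList 0,
      p.2 = 'B' ∧ PySem.Int.mod p.1 2 = x := by
    intro x
    rw [← hF, pv_mem_fold]
    simp [PySem.Set.empty]
  have hsub : ∀ x ∈ F, x = 0 ∨ x = 1 := by
    intro x hx
    rcases (hmem x).1 hx with ⟨p, _, _, hmod⟩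
    rw [← hmod]; exact pv_mod_two p.1
  have hiff : F.length = 2 ↔ ((0:Int) ∈ F ∧ (1:Int) ∈ F) := pv_len_two F hnodup hsub
  have hlen : PySem.Set.len F = (F.length : Int) := rfl
  rw [Bool.eq_iff_iff]
  simp only [hlen, Bool.and_eq_true, pv_any_eq]
  constructor
  · intro hh
    have h2 : F.length = 2 := by
      split at hh
      · exact_mod_cast ‹(F.length : Int) = 2›
      · simp at hh
    rcases hiff.1 h2 with ⟨m0, m1⟩
    exact ⟨(hmem 0).1 m0, (hmem 1).1 m1⟩
  · rintro ⟨e0, e1⟩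
    have h2 : F.length = 2 := hiff.2 ⟨(hmem 0).2 e0, (hmem 1).2 e1⟩
    simp [h2]
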